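-- pv_equiv track=rewrite | github.com/saad181/CSPP1 | remedial exam/CSPP-1_Question/Sudoku.py | getGridValues
-- ===== SOURCE A (Python) =====
-- def getGridValues(i,j,list_t):
--     sub=list()
--     if (i>=0 and i<3) and (j>=0 and j<3):
--         for subrow in range(0,3):
--             for subcolumn in range(0,3):
--                 sub.append(list_t[subrow][subcolumn])  # for 1 subgrid
--     if (i>=0 and i<3) and (j>=3 and j<6):
--         for subrow in range(0,3):
--             for subcolumn in range(3,6):
--                 sub.append(list_t[subrow][subcolumn])  #for 2 subgrid
--     if (i>=0 and i<3) and (j>=6 and j<9):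
--         for subrow in range(0,3):
--             for subcolumn in range(6,9):
--                 sub.append(list_t[subrow][subcolumn])   #for 3 subgrid
--     if (i>=3 and i<6) and (j>=0 and j<3):
--         for subrow in range(3,6):
--             for subcolumn in range(0,3):
--                 sub.append(list_t[subrow][subcolumn]) # for 4 subgrid
--     if (i>=3 and i<6) and (j>=3 and j<6):
--         for subrow in range(3,6):
--             for subcolumn in range(3,6):
--                 sub.append(list_t[subrow][subcolumn])   #for 5 subgrid
--     if (i>=3 and i<6) and (j>=6 and j<9):
--         for subrow in range(3,6):
--             for subcolumn in range(6,9):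
--                 sub.append(list_t[subrow][subcolumn])   #for 6 subgrid
--     if (i>=6 and i<9) and (j>=0 and j<3):
--         for subrow in range(6,9):
--             for subcolumn in range(0,3):
--                 sub.append(list_t[subrow][subcolumn])  #for 7 subgrid
--     if (i>=6 and i<9) and (j>=3 and j<6):
--         for subrow in range(6,9):
--             for subcolumn in range(3,6):
--                 sub.append(list_t[subrow][subcolumn])   #for 8 subgrid
--     if (i>=6 and i<9) and (j>=6 and j<9):
--         for subrow in range(6,9):
--             for subcolumn in range(6,9):
--                 sub.append(list_t[subrow][subcolumn])  #for 9 subgrid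
--     return sub
-- ===== SOURCE B (Python) =====
-- def getGridValues(i, j, list_t):
--     # Scan the whole grid cell by cell and KEEP exactly the cells whose row
--     # band equals i's band and whose column band equals j's band (bands are
--     # [0,3), [3,6), [6,9)).  No block is ever located or copied; membership
--     # of each individual cell is tested instead.
--     def band(x):
--         for b in (0, 3, 6):
--             if b <= x < b + 3:
--                 return b
--         return None
--     bi = band(i)
--     bj = band(j)
--     return [v
--             for r, row in enumerate(list_t)
--             if bi is not None and band(r) == bi
--             for c, v in enumerate(row)
--             if bj is not None and band(c) == bj]
-- ===== Notes on version B (the rewrite author's own statement) =====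
-- stated objective: alternative
-- what changed: Instead of selecting and copying a 3x3 block (A tests nine block conditions and runs a hard-coded double append loop for the matching one), B never locates a block: it scans every cell of the grid once and filters, keeping a cell (r,c) iff band(r)==band(i) and band(c)==band(j), where band maps a coordinate to its third.
import Mathlib
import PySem

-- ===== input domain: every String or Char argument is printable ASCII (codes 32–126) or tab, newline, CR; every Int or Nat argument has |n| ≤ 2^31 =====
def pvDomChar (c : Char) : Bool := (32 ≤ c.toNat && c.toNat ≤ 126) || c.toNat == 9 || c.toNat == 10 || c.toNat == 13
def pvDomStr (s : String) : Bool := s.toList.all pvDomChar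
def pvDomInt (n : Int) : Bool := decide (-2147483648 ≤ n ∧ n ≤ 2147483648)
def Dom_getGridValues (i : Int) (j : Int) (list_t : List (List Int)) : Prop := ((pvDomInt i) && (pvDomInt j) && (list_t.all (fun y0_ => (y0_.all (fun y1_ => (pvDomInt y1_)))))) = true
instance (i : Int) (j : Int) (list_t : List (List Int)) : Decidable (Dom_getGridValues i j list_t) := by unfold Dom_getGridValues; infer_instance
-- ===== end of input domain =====

-- B replaces A's nine-branch block copy by a single full-grid filter: every cell is
-- scanned once and kept iff its row/column bands equal i's/j's bands (alternative
-- decomposition). Equivalence is over the return value; nothing is mutated.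

-- ===== PORT A =====
-- one `for subrow in range(br,br+3): for subcolumn in range(bc,bc+3): sub.append(list_t[subrow][subcolumn])`
-- double loop of A; list_t[r][c] is ported with pyGet?; the `none` (IndexError) case,
-- defaulted here, is excluded by Pre_getGridValues.
def pvBlockA (t : List (List Int)) (br bc : Int) : List Int :=
  (PySem.List.pyRange br (br + 3) 1).flatMap (fun r =>
    (PySem.List.pyRange bc (bc + 3) 1).map (fun c =>
      (PySem.List.pyGet? ((PySem.List.pyGet? t r).getD []) c).getD 0))

def getGridValues (i : Int) (j : Int) (list_t : List (List Int)) : List Int :=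
  ([] : List Int)
  ++ (if (i ≥ 0 ∧ i < 3) ∧ (j ≥ 0 ∧ j < 3) then pvBlockA list_t 0 0 else [])
  ++ (if (i ≥ 0 ∧ i < 3) ∧ (j ≥ 3 ∧ j < 6) then pvBlockA list_t 0 3 else [])
  ++ (if (i ≥ 0 ∧ i < 3) ∧ (j ≥ 6 ∧ j < 9) then pvBlockA list_t 0 6 else [])
  ++ (if (i ≥ 3 ∧ i < 6) ∧ (j ≥ 0 ∧ j < 3) then pvBlockA list_t 3 0 else [])
  ++ (if (i ≥ 3 ∧ i < 6) ∧ (j ≥ 3 ∧ j < 6) then pvBlockA list_t 3 3 else [])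
  ++ (if (i ≥ 3 ∧ i < 6) ∧ (j ≥ 6 ∧ j < 9) then pvBlockA list_t 3 6 else [])
  ++ (if (i ≥ 6 ∧ i < 9) ∧ (j ≥ 0 ∧ j < 3) then pvBlockA list_t 6 0 else [])
  ++ (if (i ≥ 6 ∧ i < 9) ∧ (j ≥ 3 ∧ j < 6) then pvBlockA list_t 6 3 else [])
  ++ (if (i ≥ 6 ∧ i < 9) ∧ (j ≥ 6 ∧ j < 9) then pvBlockA list_t 6 6 else [])

-- ===== PORT B =====
-- Source B's `band`: the `for b in (0,3,6): if b <= x < b+3: return b` early-return loop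
def pvBandLoop (x : Int) : List Int → Option Int
  | [] => none
  | b :: rest => if b ≤ x ∧ x < b + 3 then some b else pvBandLoop x rest

def pvBand (x : Int) : Option Int := pvBandLoop x [0, 3, 6]

-- the nested filtering comprehension over enumerate(list_t) / enumerate(row) of Source B
def getGridValues_alt (i : Int) (j : Int) (list_t : List (List Int)) : List Int :=
  let bi := pvBand i
  let bj := pvBand j
  (PySem.List.enumerate list_t 0).flatMap (fun p =>
    if bi ≠ none ∧ pvBand p.1 = bi then
      (PySem.List.enumerate p.2 0).flatMap (fun q =>
        if bj ≠ none ∧ pvBand q.1 = bj then [q.2] else [])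
    else [])

-- ===== PRECONDITION & SPEC =====
-- Pre_ excludes exactly the inputs on which A raises IndexError: (i,j) selects a block
-- whose rows or columns are missing from list_t.
def Pre_getGridValues (i : Int) (j : Int) (list_t : List (List Int)) : Prop :=
  ∀ bn ∈ ([0, 3, 6] : List Nat), ∀ cn ∈ ([0, 3, 6] : List Nat),
    ((bn : Int) ≤ i ∧ i < (bn : Int) + 3 ∧ (cn : Int) ≤ j ∧ j < (cn : Int) + 3) →
      (bn + 3 ≤ list_t.length ∧ ∀ row ∈ (list_t.drop bn).take 3, cn + 3 ≤ row.length)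
instance (i : Int) (j : Int) (list_t : List (List Int)) : Decidable (Pre_getGridValues i j list_t) := by
  unfold Pre_getGridValues; infer_instance

def pvWitness_getGridValues : Int × Int × List (List Int) :=
  (4, 7,
   [[1,2,3,4,5,6,7,8,9],[2,3,4,5,6,7,8,9,1],[3,4,5,6,7,8,9,1,2],
    [4,5,6,7,8,9,1,2,3],[5,6,7,8,9,1,2,3,4],[6,7,8,9,1,2,3,4,5],
    [7,8,9,1,2,3,4,5,6],[8,9,1,2,3,4,5,6,7],[9,1,2,3,4,5,6,7,8]])

def Spec_getGridValues (i : Int) (j : Int) (list_t : List (List Int)) (out : List Int) : Prop := out = getGridValues_alt i j list_t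
instance (i : Int) (j : Int) (list_t : List (List Int)) (out : List Int) : Decidable (Spec_getGridValues i j list_t out) := by unfold Spec_getGridValues; infer_instance

-- ===== CLAIM =====
def Claim_equal_getGridValues : Prop := ∀ (i : Int) (j : Int) (list_t : List (List Int)), Dom_getGridValues i j list_t → Pre_getGridValues i j list_t → Spec_getGridValues i j list_t (getGridValues i j list_t)

-- ===== LEMMAS AND PROOFS =====

lemma band_eq (x bn : Int) (hbn : bn = 0 ∨ bn = 3 ∨ bn = 6) :
    (pvBand x = some bn) ↔ (bn ≤ x ∧ x < bn + 3) := by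
  rcases hbn with rfl | rfl | rfl <;>
    · simp only [pvBand, pvBandLoop]
      split_ifs <;> simp <;> omega

lemma band_none (x : Int) (h : ¬(0 ≤ x ∧ x < 9)) : pvBand x = none := by
  simp only [pvBand, pvBandLoop]
  split_ifs <;> first | rfl | omega

-- the enumerate-filter characterisation: keeping indices in [a,b) is drop/take
lemma enumFilt {α β : Type} (f : α → List β) (a b : Int) :
    ∀ (l : List α) (s : Int),
      (PySem.List.enumerate l s).flatMap
          (fun p => if a ≤ p.1 ∧ p.1 < b then f p.2 else [])
        = ((l.drop (a - s).toNat).take (b - max a s).toNat).flatMap f := by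
  intro l
  induction l with
  | nil => intro s; simp [PySem.List.enumerate_nil]
  | cons x xs ih =>
    intro s
    rw [PySem.List.enumerate_cons, List.flatMap_cons, ih (s + 1)]
    by_cases h1 : a ≤ s
    · by_cases h2 : s < b
      · have hd : (a - s).toNat = 0 := by omega
        have hd' : (a - (s + 1)).toNat = 0 := by omega
        have ht : (b - max a s).toNat = (b - max a (s + 1)).toNat + 1 := by omega
        rw [if_pos ⟨h1, h2⟩, hd, hd', ht]
        simp [List.flatMap_cons]
      · have ht : (b - max a s).toNat = 0 := by omega
        have ht' : (b - max a (s + 1)).toNat = 0 := by omega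
        rw [if_neg (by omega), ht, ht']
        simp
    · have hd : (a - s).toNat = (a - (s + 1)).toNat + 1 := by omega
      have ht : (b - max a s).toNat = (b - max a (s + 1)).toNat := by omega
      rw [if_neg (by omega), hd, ht]
      simp

lemma altEq (i j : Int) (t : List (List Int)) (bn cn : Int)
    (hbn : bn = 0 ∨ bn = 3 ∨ bn = 6) (hcn : cn = 0 ∨ cn = 3 ∨ cn = 6)
    (hbi : pvBand i = some bn) (hbj : pvBand j = some cn) :
    getGridValues_alt i j t
      = ((t.drop bn.toNat).take 3).flatMap (fun row => (row.drop cn.toNat).take 3) := by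
  unfold getGridValues_alt
  simp only [hbi, hbj, ne_eq, reduceCtorEq, not_false_eq_true, true_and]
  have hinner : ∀ row : List Int,
      (PySem.List.enumerate row 0).flatMap
          (fun q => if pvBand q.1 = some cn then [q.2] else [])
        = (row.drop cn.toNat).take 3 := by
    intro row
    have hc : (fun q : Int × Int => if pvBand q.1 = some cn then [q.2] else [])
        = (fun q => if cn ≤ q.1 ∧ q.1 < cn + 3 then [q.2] else []) := by
      funext q; rw [if_congr (band_eq q.1 cn hcn) rfl rfl]
    rw [hc, enumFilt (fun v => [v]) cn (cn + 3) row 0]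
    have e1 : (cn - 0).toNat = cn.toNat := by omega
    have e2 : (cn + 3 - max cn 0).toNat = 3 := by omega
    rw [e1, e2]
    simp
  have hc : (fun p : Int × List Int =>
        if pvBand p.1 = some bn then
          (PySem.List.enumerate p.2 0).flatMap
            (fun q => if pvBand q.1 = some cn then [q.2] else [])
        else [])
      = (fun p => if bn ≤ p.1 ∧ p.1 < bn + 3 then (p.2.drop cn.toNat).take 3 else []) := by
    funext p; rw [hinner p.2, if_congr (band_eq p.1 bn hbn) rfl rfl]
  rw [hc, enumFilt (fun row : List Int => (row.drop cn.toNat).take 3) bn (bn + 3) t 0]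
  have e1 : (bn - 0).toNat = bn.toNat := by omega
  have e2 : (bn + 3 - max bn 0).toNat = 3 := by omega
  rw [e1, e2]

lemma altNil (i j : Int) (t : List (List Int))
    (h : pvBand i = none ∨ pvBand j = none) :
    getGridValues_alt i j t = [] := by
  unfold getGridValues_alt
  rcases h with h | h <;> simp [h]

lemma drop3 {α : Type} (l : List α) (n : Nat) (h : n + 3 ≤ l.length) :
    ∃ a b c rest, l.drop n = a :: b :: c :: rest := by
  rcases hm : l.drop n with _ | ⟨a, _ | ⟨b, _ | ⟨c, rest⟩⟩⟩ <;>
    first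
      | exact ⟨a, b, c, rest, rfl⟩
      | (exfalso; have := congrArg List.length hm; simp [List.length_drop] at this; omega)

lemma rowEq (r : List Int) (cn : Nat) (h : cn + 3 ≤ r.length) :
    (PySem.List.pyRange (cn : Int) ((cn : Int) + 3) 1).map
      (fun c => (PySem.List.pyGet? r c).getD 0) = (r.drop cn).take 3 := by
  obtain ⟨a, b, c, rest, e⟩ := drop3 r cn h
  rw [PySem.List.pyRange_one_cons (by omega), PySem.List.pyRange_one_cons (by omega),
      PySem.List.pyRange_one_cons (by omega), PySem.List.pyRange_one_eq_nil (by omega)]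
  have g : ∀ k : Nat, (r.drop cn)[k]? = r[cn + k]? := fun k => List.getElem?_drop
  have e0 : PySem.List.pyGet? r ((cn : Int)) = some a := by
    rw [PySem.List.pyGet?_natCast]; simpa [e] using (g 0).symm
  have e1 : PySem.List.pyGet? r ((cn : Int) + 1) = some b := by
    rw [show ((cn : Int) + 1) = ((cn + 1 : Nat) : Int) by push_cast; ring,
        PySem.List.pyGet?_natCast]; simpa [e] using (g 1).symm
  have e2 : PySem.List.pyGet? r ((cn : Int) + 1 + 1) = some c := by
    rw [show ((cn : Int) + 1 + 1) = ((cn + 2 : Nat) : Int) by push_cast; ring,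
        PySem.List.pyGet?_natCast]; simpa [e] using (g 2).symm
  simp [e, e0, e1, e2]

lemma blockEq (t : List (List Int)) (bn cn : Nat)
    (h1 : bn + 3 ≤ t.length)
    (h2 : ∀ row ∈ (t.drop bn).take 3, cn + 3 ≤ row.length) :
    pvBlockA t (bn : Int) (cn : Int) =
      ((t.drop bn).take 3).flatMap (fun row => (row.drop cn).take 3) := by
  obtain ⟨a, b, c, rest, e⟩ := drop3 t bn h1
  have ha : a ∈ (t.drop bn).take 3 := by rw [e]; simp
  have hb : b ∈ (t.drop bn).take 3 := by rw [e]; simp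
  have hc : c ∈ (t.drop bn).take 3 := by rw [e]; simp
  have g : ∀ k : Nat, (t.drop bn)[k]? = t[bn + k]? := fun k => List.getElem?_drop
  have e0 : PySem.List.pyGet? t ((bn : Int)) = some a := by
    rw [PySem.List.pyGet?_natCast]; simpa [e] using (g 0).symm
  have e1 : PySem.List.pyGet? t ((bn : Int) + 1) = some b := by
    rw [show ((bn : Int) + 1) = ((bn + 1 : Nat) : Int) by push_cast; ring,
        PySem.List.pyGet?_natCast]; simpa [e] using (g 1).symm
  have e2 : PySem.List.pyGet? t ((bn : Int) + 1 + 1) = some c := by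
    rw [show ((bn : Int) + 1 + 1) = ((bn + 2 : Nat) : Int) by push_cast; ring,
        PySem.List.pyGet?_natCast]; simpa [e] using (g 2).symm
  unfold pvBlockA
  rw [PySem.List.pyRange_one_cons (a := (bn : Int)) (b := (bn : Int) + 3) (by omega),
      PySem.List.pyRange_one_cons (a := (bn : Int) + 1) (b := (bn : Int) + 3) (by omega),
      PySem.List.pyRange_one_cons (a := (bn : Int) + 1 + 1) (b := (bn : Int) + 3) (by omega),
      PySem.List.pyRange_one_eq_nil (a := (bn : Int) + 1 + 1 + 1) (b := (bn : Int) + 3) (by omega)]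
  simp only [List.flatMap_cons, List.flatMap_nil, List.append_nil, e0, e1, e2, Option.getD_some]
  rw [rowEq a cn (h2 a ha), rowEq b cn (h2 b hb), rowEq c cn (h2 c hc), e]
  simp

-- ===== VERDICT =====
theorem getGridValues_spec : Claim_equal_getGridValues := by
  intro i j t _ hpre
  unfold Spec_getGridValues
  by_cases hO : (0 ≤ i ∧ i < 9) ∧ (0 ≤ j ∧ j < 9)
  · have hi : (0 ≤ i ∧ i < 3) ∨ (3 ≤ i ∧ i < 6) ∨ (6 ≤ i ∧ i < 9) := by omega
    have hj : (0 ≤ j ∧ j < 3) ∨ (3 ≤ j ∧ j < 6) ∨ (6 ≤ j ∧ j < 9) := by omega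
    obtain hi | hi | hi := hi <;> obtain hj | hj | hj := hj
    · obtain ⟨h1, h2⟩ := hpre 0 (by simp) 0 (by simp) ⟨by omega, by omega, by omega, by omega⟩
      rw [altEq i j t 0 0 (by omega) (by omega)
            ((band_eq i 0 (by omega)).mpr (by omega)) ((band_eq j 0 (by omega)).mpr (by omega))]
      have hblk := blockEq t 0 0 h1 h2
      simp only [Nat.cast_zero] at hblk
      simp only [getGridValues, List.nil_append, List.append_nil,
        if_pos (show (i ≥ 0 ∧ i < 3) ∧ (j ≥ 0 ∧ j < 3) by omega),
        if_neg (show ¬((i ≥ 0 ∧ i < 3) ∧ (j ≥ 3 ∧ j < 6)) by omega),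
        if_neg (show ¬((i ≥ 0 ∧ i < 3) ∧ (j ≥ 6 ∧ j < 9)) by omega),
        if_neg (show ¬((i ≥ 3 ∧ i < 6) ∧ (j ≥ 0 ∧ j < 3)) by omega),
        if_neg (show ¬((i ≥ 3 ∧ i < 6) ∧ (j ≥ 3 ∧ j < 6)) by omega),
        if_neg (show ¬((i ≥ 3 ∧ i < 6) ∧ (j ≥ 6 ∧ j < 9)) by omega),
        if_neg (show ¬((i ≥ 6 ∧ i < 9) ∧ (j ≥ 0 ∧ j < 3)) by omega),
        if_neg (show ¬((i ≥ 6 ∧ i < 9) ∧ (j ≥ 3 ∧ j < 6)) by omega),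
        if_neg (show ¬((i ≥ 6 ∧ i < 9) ∧ (j ≥ 6 ∧ j < 9)) by omega)]
      rw [hblk]; rfl
    · obtain ⟨h1, h2⟩ := hpre 0 (by simp) 3 (by simp) ⟨by omega, by omega, by omega, by omega⟩
      rw [altEq i j t 0 3 (by omega) (by omega)
            ((band_eq i 0 (by omega)).mpr (by omega)) ((band_eq j 3 (by omega)).mpr (by omega))]
      have hblk := blockEq t 0 3 h1 h2
      simp only [Nat.cast_zero, Nat.cast_ofNat] at hblk
      simp only [getGridValues, List.nil_append, List.append_nil,
        if_neg (show ¬((i ≥ 0 ∧ i < 3) ∧ (j ≥ 0 ∧ j < 3)) by omega),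
        if_pos (show (i ≥ 0 ∧ i < 3) ∧ (j ≥ 3 ∧ j < 6) by omega),
        if_neg (show ¬((i ≥ 0 ∧ i < 3) ∧ (j ≥ 6 ∧ j < 9)) by omega),
        if_neg (show ¬((i ≥ 3 ∧ i < 6) ∧ (j ≥ 0 ∧ j < 3)) by omega),
        if_neg (show ¬((i ≥ 3 ∧ i < 6) ∧ (j ≥ 3 ∧ j < 6)) by omega),
        if_neg (show ¬((i ≥ 3 ∧ i < 6) ∧ (j ≥ 6 ∧ j < 9)) by omega),
        if_neg (show ¬((i ≥ 6 ∧ i < 9) ∧ (j ≥ 0 ∧ j < 3)) by omega),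
        if_neg (show ¬((i ≥ 6 ∧ i < 9) ∧ (j ≥ 3 ∧ j < 6)) by omega),
        if_neg (show ¬((i ≥ 6 ∧ i < 9) ∧ (j ≥ 6 ∧ j < 9)) by omega)]
      rw [hblk]; rfl
    · obtain ⟨h1, h2⟩ := hpre 0 (by simp) 6 (by simp) ⟨by omega, by omega, by omega, by omega⟩
      rw [altEq i j t 0 6 (by omega) (by omega)
            ((band_eq i 0 (by omega)).mpr (by omega)) ((band_eq j 6 (by omega)).mpr (by omega))]
      have hblk := blockEq t 0 6 h1 h2
      simp only [Nat.cast_zero, Nat.cast_ofNat] at hblk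
      simp only [getGridValues, List.nil_append, List.append_nil,
        if_neg (show ¬((i ≥ 0 ∧ i < 3) ∧ (j ≥ 0 ∧ j < 3)) by omega),
        if_neg (show ¬((i ≥ 0 ∧ i < 3) ∧ (j ≥ 3 ∧ j < 6)) by omega),
        if_pos (show (i ≥ 0 ∧ i < 3) ∧ (j ≥ 6 ∧ j < 9) by omega),
        if_neg (show ¬((i ≥ 3 ∧ i < 6) ∧ (j ≥ 0 ∧ j < 3)) by omega),
        if_neg (show ¬((i ≥ 3 ∧ i < 6) ∧ (j ≥ 3 ∧ j < 6)) by omega),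
        if_neg (show ¬((i ≥ 3 ∧ i < 6) ∧ (j ≥ 6 ∧ j < 9)) by omega),
        if_neg (show ¬((i ≥ 6 ∧ i < 9) ∧ (j ≥ 0 ∧ j < 3)) by omega),
        if_neg (show ¬((i ≥ 6 ∧ i < 9) ∧ (j ≥ 3 ∧ j < 6)) by omega),
        if_neg (show ¬((i ≥ 6 ∧ i < 9) ∧ (j ≥ 6 ∧ j < 9)) by omega)]
      rw [hblk]; rfl
    · obtain ⟨h1, h2⟩ := hpre 3 (by simp) 0 (by simp) ⟨by omega, by omega, by omega, by omega⟩
      rw [altEq i j t 3 0 (by omega) (by omega)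
            ((band_eq i 3 (by omega)).mpr (by omega)) ((band_eq j 0 (by omega)).mpr (by omega))]
      have hblk := blockEq t 3 0 h1 h2
      simp only [Nat.cast_zero, Nat.cast_ofNat] at hblk
      simp only [getGridValues, List.nil_append, List.append_nil,
        if_neg (show ¬((i ≥ 0 ∧ i < 3) ∧ (j ≥ 0 ∧ j < 3)) by omega),
        if_neg (show ¬((i ≥ 0 ∧ i < 3) ∧ (j ≥ 3 ∧ j < 6)) by omega),
        if_neg (show ¬((i ≥ 0 ∧ i < 3) ∧ (j ≥ 6 ∧ j < 9)) by omega),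
        if_pos (show (i ≥ 3 ∧ i < 6) ∧ (j ≥ 0 ∧ j < 3) by omega),
        if_neg (show ¬((i ≥ 3 ∧ i < 6) ∧ (j ≥ 3 ∧ j < 6)) by omega),
        if_neg (show ¬((i ≥ 3 ∧ i < 6) ∧ (j ≥ 6 ∧ j < 9)) by omega),
        if_neg (show ¬((i ≥ 6 ∧ i < 9) ∧ (j ≥ 0 ∧ j < 3)) by omega),
        if_neg (show ¬((i ≥ 6 ∧ i < 9) ∧ (j ≥ 3 ∧ j < 6)) by omega),
        if_neg (show ¬((i ≥ 6 ∧ i < 9) ∧ (j ≥ 6 ∧ j < 9)) by omega)]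
      rw [hblk]; rfl
    · obtain ⟨h1, h2⟩ := hpre 3 (by simp) 3 (by simp) ⟨by omega, by omega, by omega, by omega⟩
      rw [altEq i j t 3 3 (by omega) (by omega)
            ((band_eq i 3 (by omega)).mpr (by omega)) ((band_eq j 3 (by omega)).mpr (by omega))]
      have hblk := blockEq t 3 3 h1 h2
      simp only [Nat.cast_ofNat] at hblk
      simp only [getGridValues, List.nil_append, List.append_nil,
        if_neg (show ¬((i ≥ 0 ∧ i < 3) ∧ (j ≥ 0 ∧ j < 3)) by omega),
        if_neg (show ¬((i ≥ 0 ∧ i < 3) ∧ (j ≥ 3 ∧ j < 6)) by omega),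
        if_neg (show ¬((i ≥ 0 ∧ i < 3) ∧ (j ≥ 6 ∧ j < 9)) by omega),
        if_neg (show ¬((i ≥ 3 ∧ i < 6) ∧ (j ≥ 0 ∧ j < 3)) by omega),
        if_pos (show (i ≥ 3 ∧ i < 6) ∧ (j ≥ 3 ∧ j < 6) by omega),
        if_neg (show ¬((i ≥ 3 ∧ i < 6) ∧ (j ≥ 6 ∧ j < 9)) by omega),
        if_neg (show ¬((i ≥ 6 ∧ i < 9) ∧ (j ≥ 0 ∧ j < 3)) by omega),
        if_neg (show ¬((i ≥ 6 ∧ i < 9) ∧ (j ≥ 3 ∧ j < 6)) by omega),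
        if_neg (show ¬((i ≥ 6 ∧ i < 9) ∧ (j ≥ 6 ∧ j < 9)) by omega)]
      rw [hblk]; rfl
    · obtain ⟨h1, h2⟩ := hpre 3 (by simp) 6 (by simp) ⟨by omega, by omega, by omega, by omega⟩
      rw [altEq i j t 3 6 (by omega) (by omega)
            ((band_eq i 3 (by omega)).mpr (by omega)) ((band_eq j 6 (by omega)).mpr (by omega))]
      have hblk := blockEq t 3 6 h1 h2
      simp only [Nat.cast_ofNat] at hblk
      simp only [getGridValues, List.nil_append, List.append_nil,
        if_neg (show ¬((i ≥ 0 ∧ i < 3) ∧ (j ≥ 0 ∧ j < 3)) by omega),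
        if_neg (show ¬((i ≥ 0 ∧ i < 3) ∧ (j ≥ 3 ∧ j < 6)) by omega),
        if_neg (show ¬((i ≥ 0 ∧ i < 3) ∧ (j ≥ 6 ∧ j < 9)) by omega),
        if_neg (show ¬((i ≥ 3 ∧ i < 6) ∧ (j ≥ 0 ∧ j < 3)) by omega),
        if_neg (show ¬((i ≥ 3 ∧ i < 6) ∧ (j ≥ 3 ∧ j < 6)) by omega),
        if_pos (show (i ≥ 3 ∧ i < 6) ∧ (j ≥ 6 ∧ j < 9) by omega),
        if_neg (show ¬((i ≥ 6 ∧ i < 9) ∧ (j ≥ 0 ∧ j < 3)) by omega),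
        if_neg (show ¬((i ≥ 6 ∧ i < 9) ∧ (j ≥ 3 ∧ j < 6)) by omega),
        if_neg (show ¬((i ≥ 6 ∧ i < 9) ∧ (j ≥ 6 ∧ j < 9)) by omega)]
      rw [hblk]; rfl
    · obtain ⟨h1, h2⟩ := hpre 6 (by simp) 0 (by simp) ⟨by omega, by omega, by omega, by omega⟩
      rw [altEq i j t 6 0 (by omega) (by omega)
            ((band_eq i 6 (by omega)).mpr (by omega)) ((band_eq j 0 (by omega)).mpr (by omega))]
      have hblk := blockEq t 6 0 h1 h2
      simp only [Nat.cast_zero, Nat.cast_ofNat] at hblk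
      simp only [getGridValues, List.nil_append, List.append_nil,
        if_neg (show ¬((i ≥ 0 ∧ i < 3) ∧ (j ≥ 0 ∧ j < 3)) by omega),
        if_neg (show ¬((i ≥ 0 ∧ i < 3) ∧ (j ≥ 3 ∧ j < 6)) by omega),
        if_neg (show ¬((i ≥ 0 ∧ i < 3) ∧ (j ≥ 6 ∧ j < 9)) by omega),
        if_neg (show ¬((i ≥ 3 ∧ i < 6) ∧ (j ≥ 0 ∧ j < 3)) by omega),
        if_neg (show ¬((i ≥ 3 ∧ i < 6) ∧ (j ≥ 3 ∧ j < 6)) by omega),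
        if_neg (show ¬((i ≥ 3 ∧ i < 6) ∧ (j ≥ 6 ∧ j < 9)) by omega),
        if_pos (show (i ≥ 6 ∧ i < 9) ∧ (j ≥ 0 ∧ j < 3) by omega),
        if_neg (show ¬((i ≥ 6 ∧ i < 9) ∧ (j ≥ 3 ∧ j < 6)) by omega),
        if_neg (show ¬((i ≥ 6 ∧ i < 9) ∧ (j ≥ 6 ∧ j < 9)) by omega)]
      rw [hblk]; rfl
    · obtain ⟨h1, h2⟩ := hpre 6 (by simp) 3 (by simp) ⟨by omega, by omega, by omega, by omega⟩
      rw [altEq i j t 6 3 (by omega) (by omega)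
            ((band_eq i 6 (by omega)).mpr (by omega)) ((band_eq j 3 (by omega)).mpr (by omega))]
      have hblk := blockEq t 6 3 h1 h2
      simp only [Nat.cast_ofNat] at hblk
      simp only [getGridValues, List.nil_append, List.append_nil,
        if_neg (show ¬((i ≥ 0 ∧ i < 3) ∧ (j ≥ 0 ∧ j < 3)) by omega),
        if_neg (show ¬((i ≥ 0 ∧ i < 3) ∧ (j ≥ 3 ∧ j < 6)) by omega),
        if_neg (show ¬((i ≥ 0 ∧ i < 3) ∧ (j ≥ 6 ∧ j < 9)) by omega),
        if_neg (show ¬((i ≥ 3 ∧ i < 6) ∧ (j ≥ 0 ∧ j < 3)) by omega),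
        if_neg (show ¬((i ≥ 3 ∧ i < 6) ∧ (j ≥ 3 ∧ j < 6)) by omega),
        if_neg (show ¬((i ≥ 3 ∧ i < 6) ∧ (j ≥ 6 ∧ j < 9)) by omega),
        if_neg (show ¬((i ≥ 6 ∧ i < 9) ∧ (j ≥ 0 ∧ j < 3)) by omega),
        if_pos (show (i ≥ 6 ∧ i < 9) ∧ (j ≥ 3 ∧ j < 6) by omega),
        if_neg (show ¬((i ≥ 6 ∧ i < 9) ∧ (j ≥ 6 ∧ j < 9)) by omega)]
      rw [hblk]; rfl
    · obtain ⟨h1, h2⟩ := hpre 6 (by simp) 6 (by simp) ⟨by omega, by omega, by omega, by omega⟩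
      rw [altEq i j t 6 6 (by omega) (by omega)
            ((band_eq i 6 (by omega)).mpr (by omega)) ((band_eq j 6 (by omega)).mpr (by omega))]
      have hblk := blockEq t 6 6 h1 h2
      simp only [Nat.cast_ofNat] at hblk
      simp only [getGridValues, List.nil_append, List.append_nil,
        if_neg (show ¬((i ≥ 0 ∧ i < 3) ∧ (j ≥ 0 ∧ j < 3)) by omega),
        if_neg (show ¬((i ≥ 0 ∧ i < 3) ∧ (j ≥ 3 ∧ j < 6)) by omega),
        if_neg (show ¬((i ≥ 0 ∧ i < 3) ∧ (j ≥ 6 ∧ j < 9)) by omega),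
        if_neg (show ¬((i ≥ 3 ∧ i < 6) ∧ (j ≥ 0 ∧ j < 3)) by omega),
        if_neg (show ¬((i ≥ 3 ∧ i < 6) ∧ (j ≥ 3 ∧ j < 6)) by omega),
        if_neg (show ¬((i ≥ 3 ∧ i < 6) ∧ (j ≥ 6 ∧ j < 9)) by omega),
        if_neg (show ¬((i ≥ 6 ∧ i < 9) ∧ (j ≥ 0 ∧ j < 3)) by omega),
        if_neg (show ¬((i ≥ 6 ∧ i < 9) ∧ (j ≥ 3 ∧ j < 6)) by omega),
        if_pos (show (i ≥ 6 ∧ i < 9) ∧ (j ≥ 6 ∧ j < 9) by omega)]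
      rw [hblk]; rfl
  · have hB : pvBand i = none ∨ pvBand j = none := by
      by_cases h : 0 ≤ i ∧ i < 9
      · exact Or.inr (band_none j (by omega))
      · exact Or.inl (band_none i h)
    rw [altNil i j t hB]
    simp only [getGridValues, List.append_nil,
      if_neg (show ¬((i ≥ 0 ∧ i < 3) ∧ (j ≥ 0 ∧ j < 3)) by omega),
      if_neg (show ¬((i ≥ 0 ∧ i < 3) ∧ (j ≥ 3 ∧ j < 6)) by omega),
      if_neg (show ¬((i ≥ 0 ∧ i < 3) ∧ (j ≥ 6 ∧ j < 9)) by omega),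
      if_neg (show ¬((i ≥ 3 ∧ i < 6) ∧ (j ≥ 0 ∧ j < 3)) by omega),
      if_neg (show ¬((i ≥ 3 ∧ i < 6) ∧ (j ≥ 3 ∧ j < 6)) by omega),
      if_neg (show ¬((i ≥ 3 ∧ i < 6) ∧ (j ≥ 6 ∧ j < 9)) by omega),
      if_neg (show ¬((i ≥ 6 ∧ i < 9) ∧ (j ≥ 0 ∧ j < 3)) by omega),
      if_neg (show ¬((i ≥ 6 ∧ i < 9) ∧ (j ≥ 3 ∧ j < 6)) by omega),
      if_neg (show ¬((i ≥ 6 ∧ i < 9) ∧ (j ≥ 6 ∧ j < 9)) by omega)]
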